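-- pv_equiv track=rewrite | github.com/pypi-data/pypi-mirror-333 | packages/musx2mxl/musx2mxl-0.2.9-py3-none-any.whl/musx2mxl/helper.py | calculate_type_and_dots
-- ===== SOURCE A (Python) =====
-- FLAG_TO_TYPE = [
--     (32768, 'maxima'), (16384, 'long'), (8192, 'breve'), (4096, 'whole'),
--     (2048, 'half'), (1024, 'quarter'), (512, 'eighth'), (256, '16th'),
--     (128, '32nd'), (64, '64th'), (32, '128th'), (16, '256th'),
--     (8, '512th'), (4, '1024th')
-- ]
--
-- def calculate_type_and_dots(dura: int) -> tuple[str, int]: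
--     """
--     Extracts the type of note (e.g., quarter, eighth) and the number of augmentation dots.
--
--     Parameters:
--         dura (int): The duration represented as an integer. The most significant bit determines the note type,
--                     and additional set bits to the right represent augmentation dots.
--
--     Returns:
--         tuple: A tuple containing the note type (str) and the number of dots (int)
--     """
--     note_type = None
--     num_dots = 0
--     for flag, type_name in FLAG_TO_TYPE:
--         if dura & flag:
--             if not note_type:
--                 note_type = type_name
--             else:
--                 num_dots += 1
--         elif note_type:
--             break
--
--     return note_type, num_dots
-- ===== SOURCE B (Python) =====
-- FLAG_TO_TYPE = [
--     (32768, 'maxima'), (16384, 'long'), (8192, 'breve'), (4096, 'whole'),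
--     (2048, 'half'), (1024, 'quarter'), (512, 'eighth'), (256, '16th'),
--     (128, '32nd'), (64, '64th'), (32, '128th'), (16, '256th'),
--     (8, '512th'), (4, '1024th')
-- ]
--
-- def calculate_type_and_dots(dura: int) -> tuple[str, int]:
--     # Bit arithmetic, no scan: w holds bits 2..15 of dura; its top bit gives
--     # the note type by direct table index, and the length of the run of set
--     # bits just below it gives the dot count.
--     w = (dura & 0xFFFF) >> 2
--     if w == 0:
--         return None, 0
--     h = w.bit_length() - 1
--     note_type = FLAG_TO_TYPE[13 - h][1]
--     mask = (1 << h) - 1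
--     gaps = mask ^ (w & mask)          # complement of the bits below the top bit
--     num_dots = h if gaps == 0 else h - gaps.bit_length()
--     return note_type, num_dots
-- ===== Notes on version B (the rewrite author's own statement) =====
-- stated objective: alternative
-- what changed: A scans the flag table accumulating state with an early break; B replaces the scan by bit arithmetic: it masks off the two sub-flag bits, finds the top set flag bit with bit_length for a direct table index, and counts the dots as the run of set bits below the top via an XOR-complement and one more bit_length, with no loop at all.
-- outside the precondition, e.g. on calculate_type_and_dots(2): A returns (None, 0), B returns (None, 0)
import Mathlib
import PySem

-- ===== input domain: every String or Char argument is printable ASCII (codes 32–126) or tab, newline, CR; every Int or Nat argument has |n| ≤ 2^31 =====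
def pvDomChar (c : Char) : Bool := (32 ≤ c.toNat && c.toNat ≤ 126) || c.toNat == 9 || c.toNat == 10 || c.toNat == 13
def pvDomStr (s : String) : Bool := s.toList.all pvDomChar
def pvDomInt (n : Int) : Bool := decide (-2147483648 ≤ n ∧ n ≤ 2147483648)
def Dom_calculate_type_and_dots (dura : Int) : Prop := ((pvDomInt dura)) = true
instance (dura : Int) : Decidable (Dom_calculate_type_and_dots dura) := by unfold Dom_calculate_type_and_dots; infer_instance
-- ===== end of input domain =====

-- B replaces A's linear scan of the flag table by direct bit arithmetic:
-- top set bit (bit_length) picks the note type by table index, and an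
-- XOR-complement plus one more bit_length counts the dots without a loop.


-- ===== PORT A =====
-- module-level constant FLAG_TO_TYPE (used by both A and B, as in the Python module)
def pvFlagToType : List (Int × String) :=
  [(32768, "maxima"), (16384, "long"), (8192, "breve"), (4096, "whole"),
   (2048, "half"), (1024, "quarter"), (512, "eighth"), (256, "16th"),
   (128, "32nd"), (64, "64th"), (32, "128th"), (16, "256th"),
   (8, "512th"), (4, "1024th")]

-- A's for-loop with break; state = (note_type : Option String, num_dots).
-- Python's `if not note_type` is the `none` test (a set note_type is never the empty string).
def pvLoopA : List (Int × String) → Int → Option String → Int → Option String × Int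
  | [], _, nt, nd => (nt, nd)
  | (flag, tname) :: rest, dura, nt, nd =>
    if PySem.Int.band dura flag ≠ 0 then
      match nt with
      | none => pvLoopA rest dura (some tname) nd
      | some _ => pvLoopA rest dura nt (nd + 1)
    else if nt.isSome then (nt, nd)        -- break
    else pvLoopA rest dura nt nd

def calculate_type_and_dots (dura : Int) : String × Int :=
  match pvLoopA pvFlagToType dura none 0 with
  | (some t, nd) => (t, nd)
  | (none, nd) => ("", nd)   -- Python returns (None, 0) here: not a String, excluded by Pre_

-- ===== PORT B =====
def calculate_type_and_dots_alt (dura : Int) : String × Int :=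
  let w : Int := (PySem.Int.band dura 65535) >>> 2
  if w = 0 then ("", 0)      -- Python returns (None, 0) here: not a String, excluded by Pre_
  else
    -- Python h = w.bit_length() - 1; w > 0 in this branch so h : Nat is exact
    let h : Nat := PySem.Int.bitLength w - 1
    -- FLAG_TO_TYPE[13 - h][1]; 0 ≤ 13 - h ≤ 13 here so the index is always in range
    let note_type : String := ((PySem.List.pyGet? pvFlagToType ((13 : Int) - (h : Int))).getD (0, "")).2
    let mask : Int := (1 <<< h) - 1
    let gaps : Int := PySem.Int.bxor mask (PySem.Int.band w mask)
    let num_dots : Int := if gaps = 0 then (h : Int) else (h : Int) - (PySem.Int.bitLength gaps : Int)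
    (note_type, num_dots)

-- ===== PRECONDITION & SPEC =====
-- Pre_ excludes exactly the durations with no flag bit set (bits 2..15 of dura all zero):
-- there A (and B) return (None, 0), and None is not a value of the declared str type.
def Pre_calculate_type_and_dots (dura : Int) : Prop := PySem.Int.band dura 65532 ≠ 0
instance (dura : Int) : Decidable (Pre_calculate_type_and_dots dura) := by unfold Pre_calculate_type_and_dots; infer_instance
def pvWitness_calculate_type_and_dots : Int := 1024

def Spec_calculate_type_and_dots (dura : Int) (out : String × Int) : Prop := out = calculate_type_and_dots_alt dura
instance (dura : Int) (out : String × Int) : Decidable (Spec_calculate_type_and_dots dura out) := by unfold Spec_calculate_type_and_dots; infer_instance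

-- ===== CLAIM (what is proved, stated in full; the proofs are below) =====
def Claim_equal_calculate_type_and_dots : Prop := ∀ (dura : Int), Dom_calculate_type_and_dots dura → Pre_calculate_type_and_dots dura → Spec_calculate_type_and_dots dura (calculate_type_and_dots dura)

-- ===== LEMMAS AND PROOFS =====

-- Python `d & 0xFFFF` is `d % 65536` (two's complement AND with an all-ones mask).
theorem pv_band_mod (d : Int) : PySem.Int.band d 65535 = d % 65536 := by
  unfold PySem.Int.band
  split
  · next h =>
    simp only [if_pos (by norm_num : (0:Int) ≤ 65535)]
    have ht : Int.toNat 65535 = 65535 := rfl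
    rw [ht, Nat.and_two_pow_sub_one_eq_mod d.toNat 16]
    omega
  · next h =>
    simp only [if_pos (by norm_num : (0:Int) ≤ 65535)]
    have ht : Int.toNat 65535 = 65535 := rfl
    have h2 : 65535 &&& (-d - 1).toNat = (-d - 1).toNat % 65536 := by
      rw [Nat.land_comm]; exact Nat.and_two_pow_sub_one_eq_mod _ 16
    rw [ht, h2]
    omega

-- a single power-of-two flag only reads a bit below 2^16, so it factors through d % 65536
theorem pv_band_pow_mod (d : Int) (i : Nat) (hi : i < 16) :
    PySem.Int.band d (2 ^ i) = PySem.Int.band (d % 65536) (2 ^ i) := by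
  have hm : (0:Int) ≤ d % 65536 := Int.emod_nonneg d (by norm_num)
  have htp : ((2:Int) ^ i).toNat = 2 ^ i := by
    rw [show ((2:Int) ^ i) = ((2 ^ i : Nat) : Int) by push_cast; ring]; exact Int.toNat_natCast _
  have hp : (0:Int) ≤ 2 ^ i := by positivity
  unfold PySem.Int.band
  rw [if_pos hp, if_pos hp]
  split
  · next hd =>
    rw [htp]
    have h1 : (d % 65536).toNat = d.toNat % 65536 := by omega
    rw [h1, show (65536:Nat) = 2 ^ 16 from by norm_num,
        Nat.and_two_pow, Nat.and_two_pow, Nat.testBit_mod_two_pow]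
    simp [hi]
  · next hd =>
    rw [htp]
    set n : Nat := (-d - 1).toNat with hn
    have h1 : (d % 65536).toNat = 65535 - n % 65536 := by omega
    have h2 : n % 65536 < 2 ^ 16 := by omega
    rw [h1, show (65535 - n % 65536 : Nat) = 2 ^ 16 - (n % 65536 + 1) from by omega,
        Nat.and_two_pow, Nat.testBit_two_pow_sub_succ h2,
        show (65536:Nat) = 2 ^ 16 from by norm_num, Nat.testBit_mod_two_pow,
        Nat.two_pow_and]
    have hle : 2 ^ i * (n.testBit i).toNat ≤ 2 ^ i := by
      cases n.testBit i <;> simp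
    cases hb : n.testBit i <;> simp [hi]


-- A's loop only looks at d through `band d flag` for the flags in the table
theorem pv_loopA_mod (fs : List (Int × String)) (d : Int) (nt : Option String) (nd : Int)
    (h : ∀ p ∈ fs, PySem.Int.band d p.1 = PySem.Int.band (d % 65536) p.1) :
    pvLoopA fs d nt nd = pvLoopA fs (d % 65536) nt nd := by
  induction fs generalizing nt nd with
  | nil => rfl
  | cons p rest ih =>
    obtain ⟨flag, tname⟩ := p
    have hp := h (flag, tname) (by simp)
    simp only [pvLoopA, hp]
    split
    · cases nt <;> exact ih _ _ (fun q hq => h q (by simp [hq]))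
    · split
      · rfl
      · exact ih _ _ (fun q hq => h q (by simp [hq]))

theorem pv_A_mod (d : Int) : calculate_type_and_dots d = calculate_type_and_dots (d % 65536) := by
  unfold calculate_type_and_dots
  rw [pv_loopA_mod]
  intro p hp
  fin_cases hp
  · rw [show (32768:Int) = 2^15 from by norm_num]; exact pv_band_pow_mod d 15 (by norm_num)
  · rw [show (16384:Int) = 2^14 from by norm_num]; exact pv_band_pow_mod d 14 (by norm_num)
  · rw [show (8192:Int) = 2^13 from by norm_num]; exact pv_band_pow_mod d 13 (by norm_num)
  · rw [show (4096:Int) = 2^12 from by norm_num]; exact pv_band_pow_mod d 12 (by norm_num)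
  · rw [show (2048:Int) = 2^11 from by norm_num]; exact pv_band_pow_mod d 11 (by norm_num)
  · rw [show (1024:Int) = 2^10 from by norm_num]; exact pv_band_pow_mod d 10 (by norm_num)
  · rw [show (512:Int) = 2^9 from by norm_num]; exact pv_band_pow_mod d 9 (by norm_num)
  · rw [show (256:Int) = 2^8 from by norm_num]; exact pv_band_pow_mod d 8 (by norm_num)
  · rw [show (128:Int) = 2^7 from by norm_num]; exact pv_band_pow_mod d 7 (by norm_num)
  · rw [show (64:Int) = 2^6 from by norm_num]; exact pv_band_pow_mod d 6 (by norm_num)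
  · rw [show (32:Int) = 2^5 from by norm_num]; exact pv_band_pow_mod d 5 (by norm_num)
  · rw [show (16:Int) = 2^4 from by norm_num]; exact pv_band_pow_mod d 4 (by norm_num)
  · rw [show (8:Int) = 2^3 from by norm_num]; exact pv_band_pow_mod d 3 (by norm_num)
  · rw [show (4:Int) = 2^2 from by norm_num]; exact pv_band_pow_mod d 2 (by norm_num)

theorem pv_B_mod (d : Int) : calculate_type_and_dots_alt d = calculate_type_and_dots_alt (d % 65536) := by
  unfold calculate_type_and_dots_alt
  rw [pv_band_mod, pv_band_mod, Int.emod_emod_of_dvd d (by norm_num)]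



-- run of consecutive set bits of w from bit e-1 downward (the dot count, Nat level)
def pvRW : Nat → Nat → Nat
  | 0, _ => 0
  | e+1, w => if w.testBit e then pvRW e w + 1 else 0

-- the shape of (a suffix of) the flag table: descending powers of two down to 4
def pvGT : List (Int × String) → Nat → Prop
  | [(f, _)], 0 => f = 4
  | (f, _) :: r :: rs, e+1 => f = 2^(e+3) ∧ pvGT (r :: rs) e
  | _, _ => False

-- the counting phase of A's loop (after note_type is set)
def pvCnt : List (Int × String) → Int → Int
  | [], _ => 0
  | (f, _) :: r, d => if PySem.Int.band d f ≠ 0 then pvCnt r d + 1 else 0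

theorem pv_gt_table : pvGT pvFlagToType 13 := by
  unfold pvFlagToType pvGT
  norm_num [pvGT]

-- step equations for A's loop and the counters
theorem pv_loopA_hit {f : Int} {t : String} {r : List (Int × String)} {d nd : Int}
    (hb : PySem.Int.band d f ≠ 0) :
    pvLoopA ((f, t) :: r) d none nd = pvLoopA r d (some t) nd := by simp [pvLoopA, hb]

theorem pv_loopA_more {f : Int} {t s : String} {r : List (Int × String)} {d nd : Int}
    (hb : PySem.Int.band d f ≠ 0) :
    pvLoopA ((f, t) :: r) d (some s) nd = pvLoopA r d (some s) (nd + 1) := by simp [pvLoopA, hb]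

theorem pv_loopA_skip {f : Int} {t : String} {r : List (Int × String)} {d nd : Int}
    (hb : PySem.Int.band d f = 0) :
    pvLoopA ((f, t) :: r) d none nd = pvLoopA r d none nd := by simp [pvLoopA, hb]

theorem pv_loopA_break {f : Int} {t s : String} {r : List (Int × String)} {d nd : Int}
    (hb : PySem.Int.band d f = 0) :
    pvLoopA ((f, t) :: r) d (some s) nd = (some s, nd) := by simp [pvLoopA, hb]

theorem pv_cnt_cons (f : Int) (t : String) (r : List (Int × String)) (d : Int) :
    pvCnt ((f, t) :: r) d = if PySem.Int.band d f ≠ 0 then pvCnt r d + 1 else 0 := rfl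

theorem pv_rw_succ (e w : Nat) :
    pvRW (e+1) w = if w.testBit e then pvRW e w + 1 else 0 := rfl

theorem pv_band_tb (n i : Nat) :
    PySem.Int.band (n : Int) ((2:Int)^i) = if n.testBit i then (2:Int)^i else 0 := by
  have h2 : ((2:Int)^i) = ((2^i : Nat) : Int) := by push_cast; ring
  rw [h2, PySem.Int.band_natCast, Nat.and_two_pow]
  cases n.testBit i <;> simp

theorem pv_band_tb_false (n i : Nat) (h : n.testBit i = false) :
    PySem.Int.band (n : Int) ((2:Int)^i) = 0 := by rw [pv_band_tb, h]; simp

theorem pv_band_tb_true (n i : Nat) (h : n.testBit i = true) :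
    PySem.Int.band (n : Int) ((2:Int)^i) ≠ 0 := by
  rw [pv_band_tb, h, if_pos rfl]; positivity

theorem pv_testBit_of_range {n h : Nat} (h1 : 2^h ≤ n) (h2 : n < 2^(h+1)) :
    n.testBit h = true := by
  have hp : 2^(h+1) = 2 * 2^h := by ring
  rw [Nat.testBit_eq_decide_div_mod_eq]
  have hd : n / 2^h = 1 := Nat.div_eq_of_lt_le (by omega) (by omega)
  simp [hd]

theorem pv_testBit_of_lt {n i : Nat} (h : n < 2^i) : n.testBit i = false :=
  Nat.testBit_lt_two_pow h

theorem pv_testBit_sh (n e : Nat) : (n >>> 2).testBit e = n.testBit (e + 2) := by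
  rw [Nat.testBit_shiftRight]; congr 1; omega

-- A's loop with note_type already set: it adds the leading run and stops
theorem pv_phase2 (fs : List (Int × String)) (d : Int) (t : String) (c : Int) :
    pvLoopA fs d (some t) c = (some t, c + pvCnt fs d) := by
  induction fs generalizing c with
  | nil => simp [pvLoopA, pvCnt]
  | cons p r ih =>
    obtain ⟨f, name⟩ := p
    by_cases hb : PySem.Int.band d f = 0
    · rw [pv_loopA_break hb, pv_cnt_cons, if_neg (by simpa using hb)]
      simp
    · rw [pv_loopA_more hb, ih, pv_cnt_cons, if_pos hb]
      ring_nf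

theorem pv_cnt_tbl (fs : List (Int × String)) (e n : Nat) (hgt : pvGT fs e) :
    pvCnt fs (n : Int) = ((pvRW (e+1) (n >>> 2) : Nat) : Int) := by
  induction fs generalizing e with
  | nil => cases e <;> simp [pvGT] at hgt
  | cons p r ih =>
    obtain ⟨f, name⟩ := p
    match e, r with
    | 0, [] =>
      have hf : f = 4 := hgt
      subst hf
      rw [pv_cnt_cons, pv_rw_succ, pv_testBit_sh n 0,
        show ((4:Int)) = (2:Int)^2 from by norm_num, pv_band_tb n 2]
      cases n.testBit (0 + 2) <;> simp [pvCnt, pvRW]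
    | 0, _ :: _ => simp [pvGT] at hgt
    | e'+1, [] => simp [pvGT] at hgt
    | e'+1, q :: qs =>
      obtain ⟨hf, hgt'⟩ := hgt
      subst hf
      rw [pv_cnt_cons, pv_rw_succ, pv_testBit_sh n (e'+1),
        show ((2:Int)^(e'+3) : Int) = (2:Int)^(e'+3) from rfl, pv_band_tb n (e'+3),
        show e' + 1 + 2 = e' + 3 from by omega, ih _ hgt']
      cases n.testBit (e'+3) <;> simp

theorem pv_skip_all (fs : List (Int × String)) (e n : Nat) (hgt : pvGT fs e) (hn : n < 4) :
    pvLoopA fs (n : Int) none 0 = (none, 0) := by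
  induction fs generalizing e with
  | nil => rfl
  | cons p r ih =>
    obtain ⟨f, name⟩ := p
    match e, r with
    | 0, [] =>
      have hf : f = 4 := hgt
      subst hf
      have hb : PySem.Int.band (n : Int) 4 = 0 := by
        rw [show ((4:Int)) = (2:Int)^2 from by norm_num]
        exact pv_band_tb_false n 2 (pv_testBit_of_lt (by norm_num; omega))
      rw [pv_loopA_skip hb]
      rfl
    | 0, _ :: _ => simp [pvGT] at hgt
    | e'+1, [] => simp [pvGT] at hgt
    | e'+1, q :: qs =>
      obtain ⟨hf, hgt'⟩ := hgt
      subst hf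
      have hb : PySem.Int.band (n : Int) ((2:Int)^(e'+3)) = 0 :=
        pv_band_tb_false n (e'+3) (pv_testBit_of_lt (by
          calc n < 4 := hn
          _ ≤ 2^(e'+3) := by
              calc (4:Nat) = 2^2 := by norm_num
              _ ≤ 2^(e'+3) := Nat.pow_le_pow_right (by norm_num) (by omega)))
      rw [pv_loopA_skip hb]
      exact ih _ hgt'

theorem pv_find (fs : List (Int × String)) (e n h : Nat) (hgt : pvGT fs e)
    (h2 : 2 ≤ h) (he : h ≤ e + 2) (hlo : 2^h ≤ n) (hhi : n < 2^(h+1)) :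
    pvLoopA fs (n : Int) none 0 =
      (some ((fs.drop (e+2-h)).headD (0,"")).2, ((pvRW (h-2) (n >>> 2) : Nat) : Int)) := by
  induction fs generalizing e with
  | nil => cases e <;> simp [pvGT] at hgt
  | cons p r ih =>
    obtain ⟨f, name⟩ := p
    match e, r with
    | 0, [] =>
      have hf : f = 4 := hgt
      subst hf
      have hh : h = 2 := by omega
      subst hh
      have hb : PySem.Int.band (n : Int) 4 ≠ 0 := by
        rw [show ((4:Int)) = (2:Int)^2 from by norm_num]
        exact pv_band_tb_true n 2 (pv_testBit_of_range hlo hhi)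
      rw [pv_loopA_hit hb]
      simp [pvLoopA, pvRW]
    | 0, _ :: _ => simp [pvGT] at hgt
    | e'+1, [] => simp [pvGT] at hgt
    | e'+1, q :: qs =>
      obtain ⟨hf, hgt'⟩ := hgt
      subst hf
      by_cases htop : h = e' + 3
      · subst htop
        have hb : PySem.Int.band (n : Int) ((2:Int)^(e'+3)) ≠ 0 :=
          pv_band_tb_true n (e'+3) (pv_testBit_of_range hlo hhi)
        rw [pv_loopA_hit hb, pv_phase2, pv_cnt_tbl _ _ _ hgt',
          show e' + 1 + 2 - (e' + 3) = 0 from by omega,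
          show e' + 3 - 2 = e' + 1 from by omega]
        simp
      · have hlt : h ≤ e' + 2 := by omega
        have hb : PySem.Int.band (n : Int) ((2:Int)^(e'+3)) = 0 :=
          pv_band_tb_false n (e'+3) (pv_testBit_of_lt (by
            calc n < 2^(h+1) := hhi
            _ ≤ 2^(e'+3) := Nat.pow_le_pow_right (by norm_num) (by omega)))
        rw [pv_loopA_skip hb, ih _ hgt' hlt,
          show e' + 1 + 2 - h = (e' + 2 - h) + 1 from by omega, List.drop_succ_cons]

-- complementing the low k bits is subtraction from 2^k - 1
theorem pv_xorc (k u : Nat) (h : u < 2^k) : (2^k - 1) ^^^ u = 2^k - 1 - u := by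
  apply Nat.eq_of_testBit_eq
  intro i
  have h1 : (2^k - 1).testBit i = (decide (i < k) && !(0:Nat).testBit i) := by
    rw [show 2^k - 1 = 2^k - (0 + 1) from by omega]
    exact Nat.testBit_two_pow_sub_succ (Nat.two_pow_pos k) i
  have h2 : (2^k - 1 - u).testBit i = (decide (i < k) && !u.testBit i) := by
    rw [show 2^k - 1 - u = 2^k - (u + 1) from by omega]
    exact Nat.testBit_two_pow_sub_succ h i
  rw [Nat.testBit_xor, h1, h2]
  by_cases hik : i < k
  · simp [hik]
  · have hu : u.testBit i = false := pv_testBit_of_lt (by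
      calc u < 2^k := h
      _ ≤ 2^i := Nat.pow_le_pow_right (by norm_num) (by omega))
    simp [hik, hu]

theorem pv_bl_char (k v : Nat) (h1 : 2^k ≤ v) (h2 : v < 2^(k+1)) :
    PySem.Int.bitLength (v : Int) = k + 1 := by
  have hb := PySem.Int.lt_two_pow_bitLength (v : Int)
  rw [Int.natAbs_natCast] at hb
  have hv : 0 < v := by have : (0:Nat) < 2^k := Nat.two_pow_pos k; omega
  have hv0 : (v:Int) ≠ 0 := by exact_mod_cast hv.ne'
  have ha := PySem.Int.two_pow_bitLength_le (v : Int) hv0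
  rw [Int.natAbs_natCast] at ha
  set b := PySem.Int.bitLength (v:Int) with hbd
  rcases Nat.lt_trichotomy b (k+1) with hc|hc|hc
  · exfalso; have : 2^b ≤ 2^k := Nat.pow_le_pow_right (by norm_num) (by omega); omega
  · exact hc
  · exfalso; have : 2^(k+1) ≤ 2^(b-1) := Nat.pow_le_pow_right (by norm_num) (by omega); omega

theorem pv_bl_le (k v : Nat) (h : v < 2^k) : PySem.Int.bitLength (v : Int) ≤ k := by
  rcases Nat.eq_zero_or_pos v with rfl|hv
  · simp [PySem.Int.bitLength_zero]
  · have hv0 : (v:Int) ≠ 0 := by exact_mod_cast hv.ne'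
    have ha := PySem.Int.two_pow_bitLength_le (v : Int) hv0
    rw [Int.natAbs_natCast] at ha
    by_contra hgt
    have : 2^k ≤ 2^(PySem.Int.bitLength (v:Int) - 1) := Nat.pow_le_pow_right (by norm_num) (by omega)
    omega

theorem pv_rw_mod (k m u : Nat) (hk : k ≤ m) : pvRW k u = pvRW k (u % 2^m) := by
  induction k with
  | zero => rfl
  | succ k ih =>
    rw [pv_rw_succ, pv_rw_succ, Nat.testBit_mod_two_pow, ih (by omega)]
    have hd : decide (k < m) = true := by simp; omega
    rw [hd, Bool.true_and]

theorem pv_dots (k u : Nat) (h : u < 2^k) :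
    (if 2^k - 1 - u = 0 then k else k - PySem.Int.bitLength ((2^k - 1 - u : Nat) : Int)) =
      pvRW k u := by
  induction k generalizing u with
  | zero => simp [pvRW]
  | succ k ih =>
    have hp : 2^(k+1) = 2 * 2^k := by ring
    have hkpos : (0:Nat) < 2^k := Nat.two_pow_pos k
    by_cases hb : u.testBit k
    · have hge : 2^k ≤ u := by
        by_contra hlt
        rw [pv_testBit_of_lt (by omega)] at hb
        exact Bool.false_ne_true hb
      set u' := u % 2^k with hu'
      have hmod : u % 2^k = u - 2^k := by
        rw [Nat.mod_eq_sub_mod hge, Nat.mod_eq_of_lt (by omega)]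
      have hu'lt : u' < 2^k := Nat.mod_lt _ hkpos
      have hue : u = 2^k + u' := by omega
      have hsub : 2^(k+1) - 1 - u = 2^k - 1 - u' := by omega
      have hrw : pvRW (k+1) u = pvRW k u' + 1 := by
        rw [pv_rw_succ, if_pos hb, pv_rw_mod k k u (le_refl k), ← hu']
      rw [hsub, hrw, ← ih u' hu'lt]
      by_cases hz : 2^k - 1 - u' = 0
      · simp [hz]
      · have hlt : 2^k - 1 - u' < 2^k := by omega
        have hble := pv_bl_le k _ hlt
        rw [if_neg hz, if_neg hz]
        omega
    · have hlt : u < 2^k := by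
        by_contra hge
        rw [pv_testBit_of_range (by omega) h] at hb
        exact hb rfl
      have hge : 2^k ≤ 2^(k+1) - 1 - u := by omega
      have hlt2 : 2^(k+1) - 1 - u < 2^(k+1) := by omega
      have hbl := pv_bl_char k _ hge hlt2
      have hnz : 2^(k+1) - 1 - u ≠ 0 := by omega
      rw [if_neg hnz, hbl, pv_rw_succ, if_neg (by simpa using hb)]
      omega

theorem pv_key : ∀ n : Nat, n < 65536 → calculate_type_and_dots (n : Int) = calculate_type_and_dots_alt (n : Int) := by
  intro n hn
  have hmod : PySem.Int.band (n : Int) 65535 = (n : Int) := by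
    rw [pv_band_mod, Int.emod_eq_of_lt (by positivity) (by exact_mod_cast hn)]
  have hsh : ((n : Int) >>> (2:Int)) = ((n >>> 2 : Nat) : Int) := rfl
  by_cases h4 : n < 4
  · -- no flag bit: both return ("", 0)
    have hA : calculate_type_and_dots (n : Int) = ("", 0) := by
      unfold calculate_type_and_dots
      rw [pv_skip_all pvFlagToType 13 n pv_gt_table h4]
    have hw : (n >>> 2 : Nat) = 0 := by omega
    have hB : calculate_type_and_dots_alt (n : Int) = ("", 0) := by
      simp only [calculate_type_and_dots_alt]
      rw [hmod, hsh, hw]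
      norm_num
    rw [hA, hB]
  · -- some flag bit set
    rw [not_lt] at h4
    set wN : Nat := n >>> 2 with hwdef
    have hwval : wN = n / 4 := by simp [hwdef, Nat.shiftRight_eq_div_pow]
    have hw0 : wN ≠ 0 := by omega
    set k : Nat := PySem.Int.bitLength (wN : Int) - 1 with hkdef
    have hbl1 : PySem.Int.bitLength (wN : Int) ≠ 0 := by
      intro h0
      have := PySem.Int.lt_two_pow_bitLength (wN : Int)
      rw [h0] at this
      simp [Int.natAbs_natCast] at this
      omega
    have hklo : 2^k ≤ wN := by
      have := PySem.Int.two_pow_bitLength_le (wN : Int) (by exact_mod_cast hw0)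
      simpa [Int.natAbs_natCast] using this
    have hkhi : wN < 2^(k+1) := by
      have := PySem.Int.lt_two_pow_bitLength (wN : Int)
      rw [Int.natAbs_natCast] at this
      have hke : k + 1 = PySem.Int.bitLength (wN : Int) := by omega
      rw [hke]; exact this
    have hk13 : k ≤ 13 := by
      by_contra hgt
      have : 2^14 ≤ wN := le_trans (Nat.pow_le_pow_right (by norm_num) (by omega)) hklo
      omega
    have hp2 : 2^(k+2) = 4 * 2^k := by ring
    have hp3 : 2^(k+3) = 4 * 2^(k+1) := by ring
    have hlo : 2^(k+2) ≤ n := by omega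
    have hhi : n < 2^(k+2+1) := by omega
    -- A side
    have hA : calculate_type_and_dots (n : Int) =
        (((pvFlagToType.drop (13-k)).headD (0,"")).2, ((pvRW k wN : Nat) : Int)) := by
      unfold calculate_type_and_dots
      rw [pv_find pvFlagToType 13 n (k+2) pv_gt_table (by omega) (by omega) hlo hhi]
      have h1 : 13 + 2 - (k+2) = 13 - k := by omega
      have h2 : k + 2 - 2 = k := by omega
      rw [h1, h2]
    -- B side
    have hgetB : PySem.List.pyGet? pvFlagToType ((13:Int) - (k:Int)) =
        (pvFlagToType.drop (13-k)).head? := by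
      have hcast : ((13:Int) - (k:Int)) = ((13 - k : Nat) : Int) := by omega
      rw [hcast, PySem.List.pyGet?_natCast, List.head?_drop]
    simp only [calculate_type_and_dots_alt]
    rw [hmod, hsh]
    rw [if_neg (by exact_mod_cast hw0), ← hkdef, hgetB, Nat.one_shiftLeft]
    set u : Nat := wN % 2^k with hudef
    have hult : u < 2^k := Nat.mod_lt _ (Nat.two_pow_pos k)
    have hmask : ((2^k : Nat) : Int) - 1 = ((2^k - 1 : Nat) : Int) := by
      have : (1:Nat) ≤ 2^k := Nat.one_le_two_pow
      omega
    rw [hmask, PySem.Int.band_natCast, Nat.and_two_pow_sub_one_eq_mod, ← hudef,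
      PySem.Int.bxor_natCast, pv_xorc k u hult]
    set g : Nat := 2^k - 1 - u with hgdef
    have hdots := pv_dots k u hult
    rw [← hgdef] at hdots
    rw [hA]
    apply Prod.ext
    · simp [List.headD_eq_head?_getD]
    · simp only
      have hrwu : pvRW k wN = pvRW k u := pv_rw_mod k k wN (le_refl k)
      by_cases hz : g = 0
      · rw [if_pos (by exact_mod_cast congrArg (Nat.cast : Nat → Int) hz)]
        rw [if_pos hz] at hdots
        rw [hrwu, ← hdots]
      · have hgne : ((g : Nat) : Int) ≠ 0 := by exact_mod_cast hz
        rw [if_neg hgne]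
        rw [if_neg hz] at hdots
        have hble := pv_bl_le k g (by omega)
        rw [hrwu, ← hdots]
        omega

-- ===== VERDICT (by name: the statement is the Claim_ definition above) =====
theorem calculate_type_and_dots_spec : Claim_equal_calculate_type_and_dots := by
  intro dura _ _
  unfold Spec_calculate_type_and_dots
  rw [pv_A_mod, pv_B_mod]
  have h0 : 0 ≤ dura % 65536 := Int.emod_nonneg dura (by norm_num)
  have h1 : dura % 65536 < 65536 := Int.emod_lt_of_pos dura (by norm_num)
  have := pv_key (dura % 65536).toNat (by omega)
  simpa [Int.toNat_of_nonneg h0] using this
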